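-- pv_equiv track=rewrite | github.com/iqer/python-data-structure | algorithm/find_number_demo1.py | exchange_head
-- ===== SOURCE A (Python) =====
-- def exchange_head(index, numbers):
--     head = numbers[index-1]
--     for i in range(len(numbers)-1, 0, -1):
--         if head < numbers[i]:
--             numbers[index-1] = numbers[i]
--             numbers[i] = head
--             break
--     return numbers
-- ===== SOURCE B (Python) =====
-- def exchange_head(index, numbers):
--     head = numbers[index - 1]
--     candidates = [i for i in range(1, len(numbers)) if head < numbers[i]]
--     if candidates:
--         i = candidates[-1]
--         numbers[index - 1] = numbers[i]
--         numbers[i] = head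
--     return numbers
-- ===== Notes on version B (the rewrite author's own statement) =====
-- stated objective: alternative
-- what changed: Replaces the reverse scan with early break by one forward pass that collects all indices whose value exceeds the head and then swaps with the last collected index (the same maximal index).
import Mathlib
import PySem

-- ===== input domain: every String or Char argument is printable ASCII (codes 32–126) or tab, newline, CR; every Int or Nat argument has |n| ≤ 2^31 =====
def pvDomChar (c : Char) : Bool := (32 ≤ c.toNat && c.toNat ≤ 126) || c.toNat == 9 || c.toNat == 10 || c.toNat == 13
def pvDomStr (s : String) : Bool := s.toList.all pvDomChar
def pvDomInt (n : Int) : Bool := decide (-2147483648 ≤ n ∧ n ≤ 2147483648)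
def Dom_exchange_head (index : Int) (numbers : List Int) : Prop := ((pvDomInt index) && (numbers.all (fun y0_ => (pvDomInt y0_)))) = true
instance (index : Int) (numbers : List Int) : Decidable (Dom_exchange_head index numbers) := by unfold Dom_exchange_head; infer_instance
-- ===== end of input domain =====

-- B collects the matching indices in one forward pass and swaps with the last one, instead of
-- A's reverse scan with an early break; same O(n) cost (objective: alternative decomposition).
-- Both Pythons mutate `numbers` in place identically; the equivalence proved is about the return value.

-- ===== PORT A =====
-- A's `for i in range(len(numbers)-1, 0, -1): if head < numbers[i]: swap; break`
def exchangeLoopA (head idxm1 : Int) (nums : List Int) : List Int → List Int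
  | [] => nums
  | i :: rest =>
    if head < PySem.List.pyGetD nums i 0 then
      PySem.List.pySetD (PySem.List.pySetD nums idxm1 (PySem.List.pyGetD nums i 0)) i head
    else exchangeLoopA head idxm1 nums rest

def exchange_head (index : Int) (numbers : List Int) : List Int :=
  match PySem.List.pyGet? numbers (index - 1) with
  | none => numbers   -- IndexError: outside Pre_
  | some head =>
    exchangeLoopA head (index - 1) numbers
      (PySem.List.pyRange ((numbers.length : Int) - 1) 0 (-1))

-- ===== PORT B =====
def exchange_head_alt (index : Int) (numbers : List Int) : List Int :=
  match PySem.List.pyGet? numbers (index - 1) with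
  | none => numbers   -- IndexError: outside Pre_
  | some head =>
    let candidates := (PySem.List.pyRange 1 (numbers.length : Int) 1).filter
      (fun i => head < PySem.List.pyGetD numbers i 0)
    match candidates.getLast? with
    | none => numbers
    | some i =>
      PySem.List.pySetD (PySem.List.pySetD numbers (index - 1) (PySem.List.pyGetD numbers i 0)) i head

-- ===== PRECONDITION & SPEC =====
-- Pre_ excludes exactly the inputs where numbers[index-1] raises IndexError in Python.
def Pre_exchange_head (index : Int) (numbers : List Int) : Prop :=
  PySem.Raise.InRange numbers.length (index - 1)
instance (index : Int) (numbers : List Int) : Decidable (Pre_exchange_head index numbers) := by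
  unfold Pre_exchange_head; infer_instance

def pvWitness_exchange_head : Int × List Int := (1, [1, 3, 2])

def Spec_exchange_head (index : Int) (numbers : List Int) (out : List Int) : Prop := out = exchange_head_alt index numbers
instance (index : Int) (numbers : List Int) (out : List Int) : Decidable (Spec_exchange_head index numbers out) := by unfold Spec_exchange_head; infer_instance

-- ===== CLAIM (what is proved, stated in full; the proofs are below) =====
def Claim_equal_exchange_head : Prop := ∀ (index : Int) (numbers : List Int), Dom_exchange_head index numbers → Pre_exchange_head index numbers → Spec_exchange_head index numbers (exchange_head index numbers)

-- ===== LEMMAS AND PROOFS =====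

-- A's break-at-first-match loop computes the swap at the FIRST index of its list that matches.
theorem exchangeLoopA_eq_head?_filter (head idxm1 : Int) (nums : List Int) (idxs : List Int) :
    exchangeLoopA head idxm1 nums idxs =
      match (idxs.filter (fun i => head < PySem.List.pyGetD nums i 0)).head? with
      | none => nums
      | some i =>
        PySem.List.pySetD (PySem.List.pySetD nums idxm1 (PySem.List.pyGetD nums i 0)) i head := by
  induction idxs with
  | nil => rfl
  | cons i rest ih =>
    by_cases h : head < PySem.List.pyGetD nums i 0
    · simp [exchangeLoopA, h]
    · simp [exchangeLoopA, h, ih]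

theorem exchange_head_witness_pre :
    Dom_exchange_head pvWitness_exchange_head.1 pvWitness_exchange_head.2 ∧
    Pre_exchange_head pvWitness_exchange_head.1 pvWitness_exchange_head.2 := by decide

-- ===== VERDICT (by name: the statement is the Claim_ definition above) =====
theorem exchange_head_spec : Claim_equal_exchange_head := by
  intro index numbers _ _
  unfold Spec_exchange_head exchange_head exchange_head_alt
  cases h : PySem.List.pyGet? numbers (index - 1) with
  | none => rfl
  | some head =>
    dsimp only
    rw [exchangeLoopA_eq_head?_filter]
    have hr : PySem.List.pyRange ((numbers.length : Int) - 1) 0 (-1)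
        = (PySem.List.pyRange 1 (numbers.length : Int) 1).reverse := by
      rw [PySem.List.pyRange_neg_one_eq_reverse]
      norm_num
    rw [hr, List.filter_reverse, List.head?_reverse]
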